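-- pv_equiv track=rewrite | github.com/Melissa-Francielle/Processamento_Cartao_Resposta | teste5.py | group_bubbles
-- ===== SOURCE A (Python) =====
-- def group_bubbles(bubbles):
--     """Agrupa bolhas por linha e ordena"""
--     if not bubbles:
--         return []
--
--     # Agrupar por posição vertical (mesma linha)
--     bubbles.sort(key=lambda b: b['center'][1])
--     groups = []
--     current_group = [bubbles[0]]
--
--     for bubble in bubbles[1:]:
--         # Se estiver próximo o suficiente na vertical, é mesma linha
--         if abs(bubble['center'][1] - current_group[-1]['center'][1]) < 20:
--             current_group.append(bubble)
--         else:
--             groups.append(current_group)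
--             current_group = [bubble]
--
--     if current_group:
--         groups.append(current_group)
--
--     # Ordenar cada grupo horizontalmente (esquerda para direita)
--     for group in groups:
--         group.sort(key=lambda b: b['center'][0])
--
--     return groups
-- ===== SOURCE B (Python) =====
-- def group_bubbles(bubbles):
--     """Agrupa bolhas por linha e ordena (two-pointer run detection + slicing).
--     Like A, sorts `bubbles` in place by y; return-value equivalent to A."""
--     if not bubbles:
--         return []
--     bubbles.sort(key=lambda b: b['center'][1])
--     n = len(bubbles)
--     groups = []
--     i = 0
--     while i < n:
--         j = i + 1
--         while j < n and abs(bubbles[j]['center'][1] - bubbles[j - 1]['center'][1]) < 20: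
--             j += 1
--         groups.append(bubbles[i:j])
--         i = j
--     for g in groups:
--         g.sort(key=lambda b: b['center'][0])
--     return groups
-- ===== Notes on version B (the rewrite author's own statement) =====
-- stated objective: alternative
-- what changed: Replaces A's single fold that grows a current_group accumulator element-by-element with a two-pointer scan that finds each row's run boundary and slices the sorted list into rows.
import Mathlib
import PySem

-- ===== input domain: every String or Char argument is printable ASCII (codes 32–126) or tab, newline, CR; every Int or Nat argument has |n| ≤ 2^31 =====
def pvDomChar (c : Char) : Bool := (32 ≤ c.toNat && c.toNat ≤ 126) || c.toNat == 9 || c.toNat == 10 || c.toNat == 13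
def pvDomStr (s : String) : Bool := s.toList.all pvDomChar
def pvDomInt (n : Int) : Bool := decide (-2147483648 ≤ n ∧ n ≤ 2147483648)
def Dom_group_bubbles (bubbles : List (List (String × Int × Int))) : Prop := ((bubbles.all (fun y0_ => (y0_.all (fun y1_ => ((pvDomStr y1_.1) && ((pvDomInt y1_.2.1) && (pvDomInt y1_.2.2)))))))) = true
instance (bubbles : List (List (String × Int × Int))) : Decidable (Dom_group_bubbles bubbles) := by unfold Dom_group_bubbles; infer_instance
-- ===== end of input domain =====

-- B replaces A's fold with a two-pointer run scan over the sorted list (alternative decomposition,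
-- same cost). Both A and B sort the argument in place by y; the theorems are about the return value.

-- shared helper: b['center'] on the association list (first match; default never used inside Pre_)
def centerOf (b : List (String × Int × Int)) : Int × Int :=
  match b.find? (fun p => p.1 == "center") with
  | some p => p.2
  | none => (0, 0)

-- ===== PORT A =====
-- one loop step of A: compare with current_group[-1], append or start a new group
def stepA (s : List (List (List (String × Int × Int))) × List (List (String × Int × Int)))
    (b : List (String × Int × Int)) :
    List (List (List (String × Int × Int))) × List (List (String × Int × Int)) :=
  if |(centerOf b).2 - (centerOf (s.2.getLastD [])).2| < 20 then (s.1, s.2 ++ [b])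
  else (s.1 ++ [s.2], [b])

def group_bubbles (bubbles : List (List (String × Int × Int))) : List (List (List (String × Int × Int))) :=
  match PySem.List.sorted bubbles (fun b => (centerOf b).2) false with
  | [] => []
  | h :: t =>
    let s := t.foldl stepA ([], [h])
    let groups := if s.2.isEmpty then s.1 else s.1 ++ [s.2]
    groups.map (fun g => PySem.List.sorted g (fun b => (centerOf b).1) false)

-- ===== PORT B =====
-- inner while loop of B: extend the run while the next bubble is within 20 of its predecessor
def rowAux (prev : Int) : List (List (String × Int × Int)) →
    List (List (String × Int × Int)) × List (List (String × Int × Int))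
  | [] => ([], [])
  | b :: rest =>
      if |(centerOf b).2 - prev| < 20 then
        ((b :: (rowAux (centerOf b).2 rest).1), (rowAux (centerOf b).2 rest).2)
      else ([], b :: rest)

theorem rowAux_snd_le (p : Int) (l : List (List (String × Int × Int))) :
    (rowAux p l).2.length ≤ l.length := by
  induction l generalizing p with
  | nil => simp [rowAux]
  | cons b rest ih =>
      simp only [rowAux]
      split
      · exact Nat.le_succ_of_le (ih _)
      · simp

-- outer while loop of B: slice the sorted list into runs
def rowsB : List (List (String × Int × Int)) → List (List (List (String × Int × Int)))
  | [] => []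
  | b :: rest => (b :: (rowAux (centerOf b).2 rest).1) :: rowsB ((rowAux (centerOf b).2 rest).2)
  termination_by l => l.length
  decreasing_by
    simp only [List.length_cons]
    exact Nat.lt_succ_of_le (rowAux_snd_le _ _)

def group_bubbles_alt (bubbles : List (List (String × Int × Int))) : List (List (List (String × Int × Int))) :=
  let s := PySem.List.sorted bubbles (fun b => (centerOf b).2) false
  (rowsB s).map (fun g => PySem.List.sorted g (fun b => (centerOf b).1) false)

-- ===== PRECONDITION & SPEC =====
-- Pre_ excludes exactly the inputs where some bubble lacks the 'center' key: there A raises KeyError.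
def Pre_group_bubbles (bubbles : List (List (String × Int × Int))) : Prop :=
  ∀ b ∈ bubbles, b.any (fun p => p.1 == "center") = true
instance (bubbles : List (List (String × Int × Int))) : Decidable (Pre_group_bubbles bubbles) := by
  unfold Pre_group_bubbles; infer_instance

def pvWitness_group_bubbles : (List (List (String × Int × Int))) :=
  [[("center", 3, 40)], [("center", 1, 2)], [("center", 2, 5)]]

def Spec_group_bubbles (bubbles : List (List (String × Int × Int))) (out : List (List (List (String × Int × Int)))) : Prop := out = group_bubbles_alt bubbles
instance (bubbles : List (List (String × Int × Int))) (out : List (List (List (String × Int × Int)))) : Decidable (Spec_group_bubbles bubbles out) := by unfold Spec_group_bubbles; infer_instance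

-- ===== CLAIM (what is proved, stated in full; the proofs are below) =====
def Claim_equal_group_bubbles : Prop := ∀ (bubbles : List (List (String × Int × Int))), Dom_group_bubbles bubbles → Pre_group_bubbles bubbles → Spec_group_bubbles bubbles (group_bubbles bubbles)

-- ===== LEMMAS AND PROOFS =====

-- A's fold keeps current_group nonempty
theorem foldA_snd_ne (l : List (List (String × Int × Int)))
    (gs : List (List (List (String × Int × Int)))) (cur : List (List (String × Int × Int)))
    (h : cur ≠ []) : (l.foldl stepA (gs, cur)).2 ≠ [] := by
  induction l generalizing gs cur with
  | nil => simpa using h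
  | cons b rest ih =>
      simp only [List.foldl_cons, stepA]
      split
      · exact ih _ _ (by simp)
      · exact ih _ _ (by simp)

-- A's fold over the tail, with nonempty current group cur ++ [b0], produces exactly
-- the run found by rowAux followed by the remaining rows of rowsB
theorem fold_rows (l : List (List (String × Int × Int))) :
    ∀ (gs : List (List (List (String × Int × Int)))) (cur : List (List (String × Int × Int)))
      (b0 : List (String × Int × Int)),
      (l.foldl stepA (gs, cur ++ [b0])).1 ++ [(l.foldl stepA (gs, cur ++ [b0])).2]
        = gs ++ (((cur ++ [b0]) ++ (rowAux (centerOf b0).2 l).1) :: rowsB ((rowAux (centerOf b0).2 l).2)) := by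
  induction l with
  | nil => intro gs cur b0; simp [rowAux, rowsB]
  | cons b rest ih =>
      intro gs cur b0
      simp only [List.foldl_cons, stepA, List.getLastD_concat, rowAux]
      split
      · have := ih gs (cur ++ [b0]) b
        simpa [List.append_assoc] using this
      · have := ih (gs ++ [cur ++ [b0]]) [] b
        simp only [List.nil_append, List.append_assoc, List.cons_append] at this ⊢
        rw [this, rowsB]

-- ===== VERDICT (by name: the statement is the Claim_ definition above) =====
theorem group_bubbles_spec : Claim_equal_group_bubbles := by
  intro bubbles _ _
  unfold Spec_group_bubbles group_bubbles group_bubbles_alt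
  cases h : PySem.List.sorted bubbles (fun b => (centerOf b).2) false with
  | nil => simp [rowsB]
  | cons hd t =>
      have hne := foldA_snd_ne t [] [hd] (by simp)
      have key := fold_rows t [] [] hd
      simp only [List.nil_append] at key
      simp [List.isEmpty_iff, hne, key, rowsB]
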